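-- pv_equiv track=rewrite | github.com/RobertoTorino/psdbc | 1.Sources/archive_content_ids/find_content_ids.py | find_best_local_match
-- ===== SOURCE A (Python) =====
-- def find_best_local_match(title_id, master_content_list):
--     """
--     Searches the local list for the best Content ID match for a Title ID.
--     """
--     clean_tid = title_id.strip()
--
--     # We want to find IDs that contain our Title ID (e.g., NPEA00119)
--     # but aren't fluff (DLC, AVA, etc.)
--     potential_matches = []
--     skip_list = ['AVA', 'THEME', 'DLC', 'PATCH', 'AVATAR']
--
--     for cid in master_content_list:
--         # Check if the Title ID is inside the Content ID
--         if clean_tid in cid: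
--             # Apply our 'fluff' filter
--             if not any(word in cid.upper() for word in skip_list):
--                 potential_matches.append(cid)
--
--     if not potential_matches:
--         return "No Match Found in Local List"
--
--     # Prioritization:
--     # Often, base games end with _00-something.
--     # If we find one that has the Title ID and doesn't have 'EXT' or 'BUNDLE', it's likely the base.
--     for match in potential_matches:
--         if "_00-" in match:
--             return match
--
--     # If no '_00-' specific match, return the first valid one found
--     return potential_matches[0]
-- ===== SOURCE B (Python) =====
-- def find_best_local_match(title_id, master_content_list):
--     clean_tid = title_id.strip()
--     skip_list = ['AVA', 'THEME', 'DLC', 'PATCH', 'AVATAR']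
--     first_match = None
--     for cid in master_content_list:
--         if clean_tid in cid and not any(word in cid.upper() for word in skip_list):
--             if "_00-" in cid:
--                 return cid
--             if first_match is None:
--                 first_match = cid
--     return first_match if first_match is not None else "No Match Found in Local List"
-- ===== Notes on version B (the rewrite author's own statement) =====
-- stated objective: alternative
-- what changed: Replaced the build-a-list-then-rescan two-pass structure with a single pass that returns the first '_00-' candidate immediately and otherwise remembers only the first valid candidate.
import Mathlib
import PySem

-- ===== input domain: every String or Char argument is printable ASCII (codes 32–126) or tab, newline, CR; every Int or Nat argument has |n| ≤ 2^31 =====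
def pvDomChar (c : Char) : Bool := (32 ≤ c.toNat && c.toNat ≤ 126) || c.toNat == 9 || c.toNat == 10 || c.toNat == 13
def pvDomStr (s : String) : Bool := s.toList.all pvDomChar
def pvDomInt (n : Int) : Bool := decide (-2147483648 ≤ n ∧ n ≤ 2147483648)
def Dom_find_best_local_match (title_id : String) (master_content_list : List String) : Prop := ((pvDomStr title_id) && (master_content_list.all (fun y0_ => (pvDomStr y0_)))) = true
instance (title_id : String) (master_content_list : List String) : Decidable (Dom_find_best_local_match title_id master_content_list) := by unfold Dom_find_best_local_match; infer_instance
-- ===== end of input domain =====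

-- B replaces A's build-then-rescan two-pass structure with one pass that returns the
-- first "_00-" candidate immediately, else remembers only the first valid candidate
-- (objective: alternative decomposition, same O(n) cost; equivalence of return values).

-- ===== PORT A =====
def pvSkipList : List String := ["AVA", "THEME", "DLC", "PATCH", "AVATAR"]

-- the filter test applied to each cid (title-id substring and no fluff word)
def pvKeep (clean_tid cid : String) : Bool :=
  PySem.Str.isIn clean_tid cid &&
    !(pvSkipList.any (fun word => PySem.Str.isIn word (PySem.Str.upper cid)))

-- A's second loop: 'for match in potential_matches: if "_00-" in match: return match'
def pvScan00 : List String → Option String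
  | [] => none
  | m :: rest => if PySem.Str.isIn "_00-" m then some m else pvScan00 rest

def find_best_local_match (title_id : String) (master_content_list : List String) : String :=
  let clean_tid := PySem.Str.strip title_id
  let potential_matches :=
    master_content_list.foldl
      (fun acc cid => if pvKeep clean_tid cid then acc ++ [cid] else acc) []
  match potential_matches with
  | [] => "No Match Found in Local List"
  | h :: t =>
    match pvScan00 (h :: t) with
    | some m => m
    | none => h          -- potential_matches[0]

-- ===== PORT B =====
-- single pass with early exit, carrying first_match
def pvLoopB (clean_tid : String) : List String → Option String → String
  | [], first_match => first_match.getD "No Match Found in Local List"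
  | cid :: rest, first_match =>
    if pvKeep clean_tid cid then
      if PySem.Str.isIn "_00-" cid then cid
      else pvLoopB clean_tid rest
        (match first_match with | none => some cid | some f => some f)
    else pvLoopB clean_tid rest first_match

def find_best_local_match_alt (title_id : String) (master_content_list : List String) : String :=
  pvLoopB (PySem.Str.strip title_id) master_content_list none

-- ===== PRECONDITION & SPEC =====
def Spec_find_best_local_match (title_id : String) (master_content_list : List String) (out : String) : Prop := out = find_best_local_match_alt title_id master_content_list
instance (title_id : String) (master_content_list : List String) (out : String) : Decidable (Spec_find_best_local_match title_id master_content_list out) := by unfold Spec_find_best_local_match; infer_instance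

-- ===== CLAIM (what is proved, stated in full; the proofs are below) =====
def Claim_equal_find_best_local_match : Prop := ∀ (title_id : String) (master_content_list : List String), Dom_find_best_local_match title_id master_content_list → Spec_find_best_local_match title_id master_content_list (find_best_local_match title_id master_content_list)

-- ===== LEMMAS AND PROOFS =====

-- invariant of B's single pass: it computes A's scan-then-head over the filtered list,
-- with the accumulator standing in for the earliest valid candidate seen so far
theorem pvLoopB_eq (clean_tid : String) (xs : List String) (first_match : Option String) :
    pvLoopB clean_tid xs first_match =
      match pvScan00 (xs.filter (pvKeep clean_tid)) with
      | some m => m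
      | none =>
        first_match.getD
          (match xs.filter (pvKeep clean_tid) with
           | [] => "No Match Found in Local List"
           | h :: _ => h) := by
  induction xs generalizing first_match with
  | nil => simp [pvLoopB, pvScan00]
  | cons cid rest ih =>
    by_cases hk : pvKeep clean_tid cid
    · by_cases h00 : PySem.Chars.isIn ['_', '0', '0', '-'] cid.toList = true
      · simp [pvLoopB, hk, h00, pvScan00]
      · simp only [pvLoopB, hk, if_true, ih, List.filter_cons, pvScan00,
          PySem.Str.isIn]
        cases first_match <;> simp [h00]
    · simp [pvLoopB, hk, ih]

-- ===== VERDICT (by name: the statement is the Claim_ definition above) =====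
theorem find_best_local_match_spec : Claim_equal_find_best_local_match := by
  intro title_id xs _
  unfold Spec_find_best_local_match find_best_local_match find_best_local_match_alt
  rw [pvLoopB_eq]
  simp only [PySem.List.foldl_append_if_eq_filter, List.nil_append]
  cases h : List.filter (pvKeep (PySem.Str.strip title_id)) xs with
  | nil => simp [pvScan00]
  | cons a t => cases hs : pvScan00 (a :: t) <;> simp [hs]
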